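-- pv_equiv track=rewrite | github.com/TigranGit/CodeBase | Algorithms/graph/christofides.py | _odd_vertices_of_MST
-- ===== SOURCE A (Python) =====
-- def _odd_vertices_of_MST(M, number_of_nodes):
--     """
--     Returns the vertices having Odd degree in the Minimum Spanning Tree(MST).
--     """
--     odd_vertices = [0 for i in range(number_of_nodes)]
--     for u, v, _ in M:
--         odd_vertices[u] = odd_vertices[u] + 1
--         odd_vertices[v] = odd_vertices[v] + 1
--     odd_vertices = [
--         vertex for vertex, degree in enumerate(odd_vertices) if degree % 2 == 1
--     ]
--     return odd_vertices
-- ===== SOURCE B (Python) =====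
-- def _odd_vertices_of_MST(M, number_of_nodes):
--     """
--     Returns the vertices having Odd degree in the Minimum Spanning Tree(MST).
--
--     Keeps only the parity of each vertex degree: toggles each edge endpoint
--     in a set (symmetric difference), then sorts the odd vertices.
--     """
--     odd = set()
--     for u, v, _ in M:
--         odd ^= {u}
--         odd ^= {v}
--     return sorted(odd)
-- ===== Notes on version B (the rewrite author's own statement) =====
-- stated objective: faster
-- what changed: Replaces the length-number_of_nodes degree-count array plus full 0..n-1 vertex scan by a parity set toggled per edge endpoint (symmetric difference) and a final sort of only the odd vertices, so the cost no longer depends on number_of_nodes.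
-- outside the precondition, e.g. on _odd_vertices_of_MST([(-1, 0, 5)], 2): A returns [0, 1], B returns [-1, 0]
import Mathlib
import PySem

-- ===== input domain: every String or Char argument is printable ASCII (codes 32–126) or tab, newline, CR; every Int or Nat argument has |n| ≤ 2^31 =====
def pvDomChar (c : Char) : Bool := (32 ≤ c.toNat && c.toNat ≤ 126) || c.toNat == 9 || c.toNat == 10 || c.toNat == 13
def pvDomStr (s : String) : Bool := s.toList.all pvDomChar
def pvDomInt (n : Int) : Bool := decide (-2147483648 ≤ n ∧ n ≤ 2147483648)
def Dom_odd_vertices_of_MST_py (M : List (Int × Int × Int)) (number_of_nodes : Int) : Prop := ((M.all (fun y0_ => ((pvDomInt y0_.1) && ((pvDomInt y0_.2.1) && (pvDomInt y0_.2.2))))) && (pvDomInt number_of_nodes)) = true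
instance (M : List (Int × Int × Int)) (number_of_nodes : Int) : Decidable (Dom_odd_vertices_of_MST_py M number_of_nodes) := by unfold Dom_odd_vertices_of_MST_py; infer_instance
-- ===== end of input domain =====

-- B replaces A's degree-count array and full vertex scan by a parity set toggled per edge
-- endpoint, sorted at the end (objective: simpler). Equivalence is on the return value.


-- ===== PORT A =====
-- odd_vertices[i] = odd_vertices[i] + 1  (pyGetD/pySetD are exact for in-range,
-- possibly negative, indices; out-of-range indices — Python's IndexError — are outside Pre_)
def pvBump (acc : List Int) (i : Int) : List Int :=
  PySem.List.pySetD acc i (PySem.List.pyGetD acc i 0 + 1)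

def odd_vertices_of_MST_py (M : List (Int × Int × Int)) (number_of_nodes : Int) : List Int :=
  let odd_vertices : List Int := (PySem.List.pyRange 0 number_of_nodes 1).map (fun _ => 0)
  let odd_vertices := M.foldl (fun acc e => pvBump (pvBump acc e.1) e.2.1) odd_vertices
  -- enumerate(odd_vertices): stack-safe form of PySem.List.enumerate
  -- (equal by PySem.List.enumerate_eq_zipIdx_map, used in the proofs below)
  ((odd_vertices.zipIdx.map (fun p => ((0:Int) + (p.2:Int), p.1))).filter
      (fun p => PySem.Int.mod p.2 2 == 1)).map (fun p => p.1)

-- ===== PORT B =====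
def odd_vertices_of_MST_py_alt (M : List (Int × Int × Int)) (number_of_nodes : Int) : List Int :=
  let odd : PySem.Set Int :=
    M.foldl (fun s e => PySem.Set.symmDiff (PySem.Set.symmDiff s [e.1]) [e.2.1]) PySem.Set.empty
  PySem.List.sorted odd (fun x => x) false

-- all endpoint occurrences of M, in order
def pvEnds (M : List (Int × Int × Int)) : List Int := M.flatMap (fun e => [e.1, e.2.1])

-- ===== PRECONDITION & SPEC =====
-- Pre_ admits every input on which A returns normally (each endpoint a valid — possibly
-- negative, wrapping — Python index into the length-number_of_nodes list) EXCEPT edge lists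
-- with a negative endpoint of odd occurrence count: negative ids are malformed for a 0-based
-- MST vertex list, and there A's negative-index wraparound silently aliases vertex -k to
-- vertex number_of_nodes - k while B reports the label -k itself, so no single value is specified.
def Pre_odd_vertices_of_MST_py (M : List (Int × Int × Int)) (number_of_nodes : Int) : Prop :=
  (∀ e ∈ M, (-number_of_nodes ≤ e.1 ∧ e.1 < number_of_nodes) ∧
            (-number_of_nodes ≤ e.2.1 ∧ e.2.1 < number_of_nodes)) ∧
  ¬ ∃ x ∈ pvEnds M, x < 0 ∧ (pvEnds M).count x % 2 = 1
instance (M : List (Int × Int × Int)) (number_of_nodes : Int) : Decidable (Pre_odd_vertices_of_MST_py M number_of_nodes) := by unfold Pre_odd_vertices_of_MST_py; infer_instance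

def pvWitness_odd_vertices_of_MST_py : (List (Int × Int × Int)) × Int := ([(0, 1, 3)], 2)


def Spec_odd_vertices_of_MST_py (M : List (Int × Int × Int)) (number_of_nodes : Int) (out : List Int) : Prop := out = odd_vertices_of_MST_py_alt M number_of_nodes
instance (M : List (Int × Int × Int)) (number_of_nodes : Int) (out : List Int) : Decidable (Spec_odd_vertices_of_MST_py M number_of_nodes out) := by unfold Spec_odd_vertices_of_MST_py; infer_instance

-- ===== CLAIM (what is proved, stated in full; the proofs are below) =====
def Claim_equal_odd_vertices_of_MST_py : Prop := ∀ (M : List (Int × Int × Int)) (number_of_nodes : Int), Dom_odd_vertices_of_MST_py M number_of_nodes → Pre_odd_vertices_of_MST_py M number_of_nodes → Spec_odd_vertices_of_MST_py M number_of_nodes (odd_vertices_of_MST_py M number_of_nodes)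

-- ===== LEMMAS AND PROOFS =====

def pvIdx (L : Nat) (i : Int) : Nat := if 0 ≤ i then i.toNat else L - (-i).toNat

theorem pyIdx?_in (L : Nat) (i : Int) (h1 : -(L:Int) ≤ i) (h2 : i < L) :
    PySem.List.pyIdx? L i = some (pvIdx L i) := by
  simp [PySem.List.pyIdx?, pvIdx]
  split_ifs <;> simp_all <;> omega

theorem pvIdx_lt (L : Nat) (i : Int) (h1 : -(L:Int) ≤ i) (h2 : i < L) :
    pvIdx L i < L := by
  simp [pvIdx]; split_ifs <;> omega

theorem getD_pvBump (acc : List Int) (i : Int) (j : Nat)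
    (h1 : -(acc.length:Int) ≤ i) (h2 : i < acc.length) :
    (pvBump acc i).getD j 0 = acc.getD j 0 + if pvIdx acc.length i = j then 1 else 0 := by
  have hk := pvIdx_lt acc.length i h1 h2
  have hidx := pyIdx?_in acc.length i h1 h2
  simp [pvBump, PySem.List.pySetD, PySem.List.pySet?, PySem.List.pyGetD, PySem.List.pyGet?, hidx]
  by_cases hj : pvIdx acc.length i = j
  · subst hj
    simp [List.getD_eq_getElem?_getD, List.getElem?_set_self, hk, List.getElem?_eq_getElem hk]
  · rw [if_neg hj]
    simp [List.getD_eq_getElem?_getD, List.getElem?_set_ne hj]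

theorem pre_ends (M : List (Int × Int × Int)) (n : Int)
    (hpre : ∀ e ∈ M, (-n ≤ e.1 ∧ e.1 < n) ∧ (-n ≤ e.2.1 ∧ e.2.1 < n)) :
    ∀ i ∈ pvEnds M, -n ≤ i ∧ i < n := by
  intro i hi
  simp only [pvEnds, List.mem_flatMap] at hi
  obtain ⟨e, he, hie⟩ := hi
  simp only [List.mem_cons, List.mem_singleton] at hie
  rcases hie with rfl | rfl | h
  · exact (hpre e he).1
  · exact (hpre e he).2
  · cases h

theorem foldl_pair_eq_ends (M : List (Int × Int × Int)) (acc : List Int) :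
    M.foldl (fun acc e => pvBump (pvBump acc e.1) e.2.1) acc = (pvEnds M).foldl pvBump acc := by
  induction M generalizing acc with
  | nil => rfl
  | cons e M ih => simp [pvEnds, List.foldl_cons, ih]

theorem length_pvBump (acc : List Int) (i : Int) : (pvBump acc i).length = acc.length :=
  PySem.List.length_pySetD _ _ _

theorem foldl_pvBump_spec (is : List Int) (acc : List Int)
    (h : ∀ i ∈ is, -(acc.length:Int) ≤ i ∧ i < acc.length) :
    (is.foldl pvBump acc).length = acc.length ∧
    ∀ j : Nat, (is.foldl pvBump acc).getD j 0 =
      acc.getD j 0 + ((is.map (pvIdx acc.length)).count j : Int) := by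
  induction is generalizing acc with
  | nil => simp
  | cons i is ih =>
    obtain ⟨hi1, hi2⟩ := h i (List.mem_cons_self ..)
    have hlen := length_pvBump acc i
    have h' : ∀ x ∈ is, -((pvBump acc i).length:Int) ≤ x ∧ x < (pvBump acc i).length := by
      rw [hlen]; exact fun x hx => h x (List.mem_cons_of_mem _ hx)
    obtain ⟨l1, l2⟩ := ih (pvBump acc i) h'
    rw [List.foldl_cons]
    refine ⟨by rw [l1, hlen], fun j => ?_⟩
    rw [l2 j, getD_pvBump acc i j hi1 hi2, hlen]
    simp [List.count_cons]
    by_cases hj : pvIdx acc.length i = j <;> simp [hj] <;> omega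

theorem mem_odd_vertices_of_MST_py (M : List (Int × Int × Int)) (n : Int)
    (hpre : ∀ i ∈ pvEnds M, -n ≤ i ∧ i < n) (x : Int) :
    x ∈ odd_vertices_of_MST_py M n ↔ ∃ k : Nat, k < n.toNat ∧ x = (k:Int) ∧
      ((pvEnds M).map (pvIdx n.toNat)).count k % 2 = 1 := by
  unfold odd_vertices_of_MST_py
  set init : List Int := (PySem.List.pyRange 0 n 1).map (fun _ => 0) with hinit
  have hlen : init.length = n.toNat := by
    simp [hinit, PySem.List.length_pyRange_one]
  have hb : ∀ i ∈ pvEnds M, -(init.length:Int) ≤ i ∧ i < init.length := by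
    intro i hi
    obtain ⟨a, b⟩ := hpre i hi
    rw [hlen]; omega
  show x ∈ (((M.foldl (fun acc e => pvBump (pvBump acc e.1) e.2.1) init).zipIdx.map
      (fun p => ((0:Int) + (p.2:Int), p.1))).filter
      (fun p => PySem.Int.mod p.2 2 == 1)).map (fun p => p.1) ↔ _
  rw [show ((M.foldl (fun acc e => pvBump (pvBump acc e.1) e.2.1) init).zipIdx.map
      (fun p => ((0:Int) + (p.2:Int), p.1))) =
      PySem.List.enumerate (M.foldl (fun acc e => pvBump (pvBump acc e.1) e.2.1) init) 0 from
    (PySem.List.enumerate_eq_zipIdx_map _ 0).symm]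
  have he : (((PySem.List.enumerate (M.foldl (fun acc e => pvBump (pvBump acc e.1) e.2.1) init) 0).filter
        (fun p => PySem.Int.mod p.2 2 == 1)).map (fun p => p.1) : List Int) =
      ((PySem.List.enumerate ((pvEnds M).foldl pvBump init) 0).filter
        (fun p => PySem.Int.mod p.2 2 == 1)).map (fun p => p.1) := by
    rw [foldl_pair_eq_ends]
  rw [he]
  obtain ⟨l1, l2⟩ := foldl_pvBump_spec (pvEnds M) init hb
  have hinit0 : ∀ j : Nat, init.getD j 0 = 0 := by
    intro j
    rcases Nat.lt_or_ge j init.length with hj | hj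
    · rw [List.getD_eq_getElem _ _ hj]
      simp [hinit]
    · rw [List.getD_eq_default _ _ hj]
  constructor
  · intro hx
    simp only [List.mem_map, List.mem_filter] at hx
    obtain ⟨p, ⟨hpe, hpf⟩, hpx⟩ := hx
    rw [PySem.List.mem_enumerate_iff] at hpe
    obtain ⟨k, hk, rfl⟩ := hpe
    rw [l1, hlen] at hk
    refine ⟨k, hk, by simpa using hpx.symm, ?_⟩
    have hval : ((pvEnds M).foldl pvBump init)[k]'(by rw [l1]; omega) =
        ((pvEnds M).map (pvIdx n.toNat)).count k := by
      have := l2 k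
      rw [hinit0 k, hlen] at this
      rw [List.getD_eq_getElem _ _ (by rw [l1]; omega)] at this
      simpa using this
    simp only [hval] at hpf
    simp only [beq_iff_eq] at hpf
    rw [PySem.Int.mod_eq_emod_of_pos (by norm_num)] at hpf
    omega
  · rintro ⟨k, hk, rfl, hodd⟩
    simp only [List.mem_map, List.mem_filter]
    refine ⟨((0:Int) + k, ((pvEnds M).foldl pvBump init)[k]'(by rw [l1, hlen]; omega)), ⟨?_, ?_⟩, by simp⟩
    · rw [PySem.List.mem_enumerate_iff]
      exact ⟨k, by rw [l1, hlen]; omega, rfl⟩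
    · have hval : ((pvEnds M).foldl pvBump init)[k]'(by rw [l1, hlen]; omega) =
          ((pvEnds M).map (pvIdx n.toNat)).count k := by
        have := l2 k
        rw [hinit0 k, hlen] at this
        rw [List.getD_eq_getElem _ _ (by rw [l1, hlen]; omega)] at this
        simpa using this
      simp only [hval, beq_iff_eq]
      rw [PySem.Int.mod_eq_emod_of_pos (by norm_num)]
      omega

theorem pairwise_odd_vertices_of_MST_py (M : List (Int × Int × Int)) (n : Int) :
    (odd_vertices_of_MST_py M n).Pairwise (· < ·) := by
  unfold odd_vertices_of_MST_py
  show ((((M.foldl (fun acc e => pvBump (pvBump acc e.1) e.2.1)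
      ((PySem.List.pyRange 0 n 1).map (fun _ => 0))).zipIdx.map
      (fun p => ((0:Int) + (p.2:Int), p.1))).filter
      (fun p => PySem.Int.mod p.2 2 == 1)).map (fun p => p.1)).Pairwise (· < ·)
  rw [show ((M.foldl (fun acc e => pvBump (pvBump acc e.1) e.2.1)
      ((PySem.List.pyRange 0 n 1).map (fun _ => 0))).zipIdx.map
      (fun p => ((0:Int) + (p.2:Int), p.1))) =
      PySem.List.enumerate (M.foldl (fun acc e => pvBump (pvBump acc e.1) e.2.1)
      ((PySem.List.pyRange 0 n 1).map (fun _ => 0))) 0 from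
    (PySem.List.enumerate_eq_zipIdx_map _ 0).symm]
  rw [List.pairwise_map]
  exact List.Pairwise.sublist List.filter_sublist (PySem.List.pairwise_lt_enumerate _ _)

theorem pvIdx_eq_iff (L k : Nat) (i : Int) (h1 : -(L:Int) ≤ i) (h2 : i < L) (hk : k < L) :
    pvIdx L i = k ↔ (i = (k:Int) ∨ i = (k:Int) - L) := by
  simp [pvIdx]; split_ifs <;> omega

theorem count_map_pvIdx (l : List Int) (L k : Nat)
    (h : ∀ i ∈ l, -(L:Int) ≤ i ∧ i < L) (hk : k < L) :
    (l.map (pvIdx L)).count k = l.count (k:Int) + l.count ((k:Int) - L) := by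
  induction l with
  | nil => simp
  | cons i l ih =>
    obtain ⟨h1, h2⟩ := h i (List.mem_cons_self ..)
    have ihh := ih (fun x hx => h x (List.mem_cons_of_mem _ hx))
    simp only [List.map_cons, List.count_cons, ihh]
    have hiff := pvIdx_eq_iff L k i h1 h2 hk
    by_cases hik : i = (k:Int)
    · subst hik
      have hp := hiff.mpr (Or.inl rfl)
      simp [hp]
      split_ifs <;> omega
    · by_cases hikL : i = (k:Int) - (L:Int)
      · subst hikL
        have hp := hiff.mpr (Or.inr rfl)
        simp [hp]
        split_ifs <;> omega
      · have hp : ¬ pvIdx L i = k := fun hc => by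
          rcases hiff.mp hc with h | h
          exacts [hik h, hikL h]
        simp [hp, hik, hikL]


theorem mem_toggle2 (s : List Int) (u v x : Int) :
    x ∈ PySem.Set.symmDiff (PySem.Set.symmDiff s [u]) [v] ↔
      (Xor' (Xor' (x ∈ s) (x = u)) (x = v)) := by
  simp [PySem.Set.mem_symmDiff, Xor']

theorem toggle_parity (P A B : Prop) [Decidable A] [Decidable B] (c : Nat) :
    (Xor' (Xor' (Xor' P A) B) (c % 2 = 1)) ↔
      Xor' P ((((if A then 1 else 0) + (if B then 1 else 0)) + c) % 2 = 1) := by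
  by_cases hA : A <;> by_cases hB : B <;> by_cases hP : P <;>
    simp [hA, hB, hP, Xor'] <;> omega

theorem pvB_fold_mem (M : List (Int × Int × Int)) (s : List Int) (hs : s.Nodup) :
    (M.foldl (fun s e => PySem.Set.symmDiff (PySem.Set.symmDiff s [e.1]) [e.2.1]) s).Nodup ∧
    ∀ x : Int, x ∈ M.foldl (fun s e => PySem.Set.symmDiff (PySem.Set.symmDiff s [e.1]) [e.2.1]) s ↔
      Xor' (x ∈ s) ((pvEnds M).count x % 2 = 1) := by
  induction M generalizing s with
  | nil => simpa [pvEnds, Xor'] using hs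
  | cons e M ih =>
    have hnd : (PySem.Set.symmDiff (PySem.Set.symmDiff s [e.1]) [e.2.1]).Nodup :=
      PySem.Set.nodup_symmDiff _ _ (PySem.Set.nodup_symmDiff _ _ hs (List.nodup_singleton _)) (List.nodup_singleton _)
    obtain ⟨h1, h2⟩ := ih _ hnd
    refine ⟨h1, fun x => ?_⟩
    rw [List.foldl_cons, h2]
    have hc : (pvEnds (e :: M)).count x =
        ((if x = e.1 then 1 else 0) + (if x = e.2.1 then 1 else 0)) + (pvEnds M).count x := by
      simp [pvEnds, List.count_cons]
      split_ifs <;> omega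
    rw [hc]
    calc Xor' (x ∈ PySem.Set.symmDiff (PySem.Set.symmDiff s [e.1]) [e.2.1]) ((pvEnds M).count x % 2 = 1)
        ↔ Xor' (Xor' (Xor' (x ∈ s) (x = e.1)) (x = e.2.1)) ((pvEnds M).count x % 2 = 1) := by
          rw [mem_toggle2]
      _ ↔ _ := toggle_parity _ _ _ _

def pvBset (M : List (Int × Int × Int)) : List Int :=
  M.foldl (fun s e => PySem.Set.symmDiff (PySem.Set.symmDiff s [e.1]) [e.2.1]) PySem.Set.empty

theorem pvBset_nodup (M : List (Int × Int × Int)) : (pvBset M).Nodup :=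
  (pvB_fold_mem M [] List.nodup_nil).1

theorem mem_pvBset (M : List (Int × Int × Int)) (x : Int) :
    x ∈ pvBset M ↔ (pvEnds M).count x % 2 = 1 := by
  have h := (pvB_fold_mem M [] List.nodup_nil).2 x
  unfold pvBset
  rw [show (PySem.Set.empty : List Int) = [] from rfl, h]
  simp [Xor']

theorem pvMain (M : List (Int × Int × Int)) (n : Int)
    (hpre : ∀ e ∈ M, (-n ≤ e.1 ∧ e.1 < n) ∧ (-n ≤ e.2.1 ∧ e.2.1 < n))
    (hD : ¬ ∃ x ∈ pvEnds M, x < 0 ∧ (pvEnds M).count x % 2 = 1) :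
    odd_vertices_of_MST_py M n = PySem.List.sorted (pvBset M) (fun x => x) false := by
  have hpre' := pre_ends M n hpre
  have hnegeven : ∀ y : Int, y < 0 → (pvEnds M).count y % 2 = 0 := by
    intro y hy
    by_cases hmem : y ∈ pvEnds M
    · rcases Nat.mod_two_eq_zero_or_one ((pvEnds M).count y) with h | h
      · exact h
      · exact absurd ⟨y, hmem, hy, h⟩ hD
    · simp [List.count_eq_zero_of_not_mem hmem]
  have hmemiff : ∀ x : Int, x ∈ odd_vertices_of_MST_py M n ↔ x ∈ pvBset M := by
    intro x
    rw [mem_odd_vertices_of_MST_py M n hpre' x, mem_pvBset]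
    constructor
    · rintro ⟨k, hk, rfl, hcnt⟩
      rw [count_map_pvIdx _ _ _ (by intro i hi; have := hpre' i hi; constructor <;> omega) hk] at hcnt
      have he := hnegeven ((k:Int) - n.toNat) (by omega)
      omega
    · intro hodd
      have hmem : x ∈ pvEnds M := by
        by_contra hm
        simp [List.count_eq_zero_of_not_mem hm] at hodd
      obtain ⟨hx1, hx2⟩ := hpre' x hmem
      have hx0 : 0 ≤ x := by
        by_contra hneg
        have := hnegeven x (by omega)
        omega
      refine ⟨x.toNat, by omega, by omega, ?_⟩
      rw [count_map_pvIdx _ _ _ (by intro i hi; have := hpre' i hi; constructor <;> omega) (by omega)]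
      have he := hnegeven ((x.toNat : Int) - n.toNat) (by omega)
      have hxx : ((x.toNat : Int)) = x := by omega
      rw [hxx] at he ⊢
      omega
  have hperm : (odd_vertices_of_MST_py M n).Perm (pvBset M) := by
    rw [List.perm_ext_iff_of_nodup ((pairwise_odd_vertices_of_MST_py M n).imp ne_of_lt) (pvBset_nodup M)]
    exact hmemiff
  exact (PySem.List.sorted_eq_of_perm_of_pairwise_lt _ _ _ hperm (pairwise_odd_vertices_of_MST_py M n)).symm

-- ===== VERDICT (by name: the statement is the Claim_ definition above) =====

theorem odd_vertices_of_MST_py_spec : Claim_equal_odd_vertices_of_MST_py := by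
  intro M n _ hpre
  have halt : odd_vertices_of_MST_py_alt M n =
      PySem.List.sorted (pvBset M) (fun x => x) false := rfl
  unfold Spec_odd_vertices_of_MST_py
  rw [halt]
  exact pvMain M n hpre.1 hpre.2
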